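-- pv_equiv track=rewrite | github.com/YuvarajSisinty/pass_Strength_classifier | app project/password_strength_classifier/feature_extractor.py | _count_sequential_chars
-- ===== SOURCE A (Python) =====
-- def _count_sequential_chars(password: str) -> int:
--     """Count sequential character patterns (e.g., abc, 123)"""
--     count = 0
--     for i in range(len(password) - 2):
--         if password[i].isdigit() and password[i+1].isdigit() and password[i+2].isdigit():
--             if ord(password[i+1]) == ord(password[i]) + 1 and ord(password[i+2]) == ord(password[i+1]) + 1:
--                 count += 1
--         elif password[i].isalpha() and password[i+1].isalpha() and password[i+2].isalpha():
--             if ord(password[i+1].lower()) == ord(password[i].lower()) + 1 and ord(password[i+2].lower()) == ord(password[i+1].lower()) + 1: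
--                 count += 1
--     return count
-- ===== SOURCE B (Python) =====
-- def _count_sequential_chars(password: str) -> int:
--     """Count sequential character patterns (e.g., abc, 123).
--
--     Two-phase decomposition: first mark each adjacent PAIR as sequential
--     (both digits with ord difference 1, or both letters with lowercased
--     ord difference 1); a 3-char window qualifies exactly when both of its
--     adjacent pairs are sequential, so count overlapping True pairs.
--     """
--     seq = [(a.isdigit() and b.isdigit() and ord(b) == ord(a) + 1)
--            or (a.isalpha() and b.isalpha() and ord(b.lower()) == ord(a.lower()) + 1)
--            for a, b in zip(password, password[1:])]
--     return sum(1 for x, y in zip(seq, seq[1:]) if x and y)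
-- ===== Notes on version B (the rewrite author's own statement) =====
-- stated objective: simpler
-- what changed: Replaces the index-based triple-window scan with a two-phase decomposition: build a boolean table of sequential adjacent pairs, then count overlapping adjacent True pairs (a triple is sequential iff both of its pairs are).
import Mathlib
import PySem

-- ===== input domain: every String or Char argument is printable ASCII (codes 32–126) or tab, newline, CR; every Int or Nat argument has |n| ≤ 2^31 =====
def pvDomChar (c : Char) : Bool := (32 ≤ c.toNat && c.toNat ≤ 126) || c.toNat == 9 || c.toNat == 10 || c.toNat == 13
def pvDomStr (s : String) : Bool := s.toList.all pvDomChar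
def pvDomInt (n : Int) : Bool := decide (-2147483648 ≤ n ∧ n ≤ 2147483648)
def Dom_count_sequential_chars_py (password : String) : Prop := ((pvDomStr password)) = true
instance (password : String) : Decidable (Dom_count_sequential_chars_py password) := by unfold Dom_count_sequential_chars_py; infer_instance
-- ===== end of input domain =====

-- B replaces A's index-based triple-window scan with a two-phase decomposition (mark
-- sequential adjacent pairs, then count overlapping True pairs); objective: simpler.

-- ===== PORT A =====
-- literal transliteration of A's indexed loop over range(len(password) - 2)
def count_sequential_chars_py (password : String) : Int :=
  (PySem.List.pyRange 0 ((password.toList.length : Int) - 2) 1).foldl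
    (fun count i =>
      if PySem.Chars.isdigit (PySem.List.pyGetD password.toList i ' ') &&
         PySem.Chars.isdigit (PySem.List.pyGetD password.toList (i + 1) ' ') &&
         PySem.Chars.isdigit (PySem.List.pyGetD password.toList (i + 2) ' ') then
        if ((PySem.List.pyGetD password.toList (i + 1) ' ').toNat : Int) = ((PySem.List.pyGetD password.toList i ' ').toNat : Int) + 1 ∧
           ((PySem.List.pyGetD password.toList (i + 2) ' ').toNat : Int) = ((PySem.List.pyGetD password.toList (i + 1) ' ').toNat : Int) + 1 then
          count + 1
        else count
      else if PySem.Chars.isalpha (PySem.List.pyGetD password.toList i ' ') &&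
              PySem.Chars.isalpha (PySem.List.pyGetD password.toList (i + 1) ' ') &&
              PySem.Chars.isalpha (PySem.List.pyGetD password.toList (i + 2) ' ') then
        if ((PySem.Chars.lowerChar (PySem.List.pyGetD password.toList (i + 1) ' ')).toNat : Int) = ((PySem.Chars.lowerChar (PySem.List.pyGetD password.toList i ' ')).toNat : Int) + 1 ∧
           ((PySem.Chars.lowerChar (PySem.List.pyGetD password.toList (i + 2) ' ')).toNat : Int) = ((PySem.Chars.lowerChar (PySem.List.pyGetD password.toList (i + 1) ' ')).toNat : Int) + 1 then
          count + 1
        else count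
      else count)
    0

-- ===== PORT B =====
-- the pair predicate of Source B's comprehension
def pvPairSeq (a b : Char) : Bool :=
  (PySem.Chars.isdigit a && PySem.Chars.isdigit b &&
     decide ((b.toNat : Int) = (a.toNat : Int) + 1)) ||
  (PySem.Chars.isalpha a && PySem.Chars.isalpha b &&
     decide (((PySem.Chars.lowerChar b).toNat : Int) = ((PySem.Chars.lowerChar a).toNat : Int) + 1))

-- seq = [pair(a, b) for a, b in zip(password, password[1:])]
def pvSeq (cs : List Char) : List Bool :=
  (cs.zip cs.tail).map (fun p => pvPairSeq p.1 p.2)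

def count_sequential_chars_py_alt (password : String) : Int :=
  let seq := pvSeq password.toList
  (((seq.zip seq.tail).countP (fun p => p.1 && p.2) : Nat) : Int)

-- ===== PRECONDITION & SPEC =====
def Spec_count_sequential_chars_py (password : String) (out : Int) : Prop := out = count_sequential_chars_py_alt password
instance (password : String) (out : Int) : Decidable (Spec_count_sequential_chars_py password out) := by unfold Spec_count_sequential_chars_py; infer_instance

-- ===== CLAIM (what is proved, stated in full; the proofs are below) =====
def Claim_equal_count_sequential_chars_py : Prop := ∀ (password : String), Dom_count_sequential_chars_py password → Spec_count_sequential_chars_py password (count_sequential_chars_py password)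

-- ===== LEMMAS AND PROOFS =====

-- A's combined triple test, as one Bool
def pvTrip (a b c : Char) : Bool :=
  if PySem.Chars.isdigit a && PySem.Chars.isdigit b && PySem.Chars.isdigit c then
    decide ((b.toNat : Int) = (a.toNat : Int) + 1 ∧ (c.toNat : Int) = (b.toNat : Int) + 1)
  else if PySem.Chars.isalpha a && PySem.Chars.isalpha b && PySem.Chars.isalpha c then
    decide (((PySem.Chars.lowerChar b).toNat : Int) = ((PySem.Chars.lowerChar a).toNat : Int) + 1 ∧
            ((PySem.Chars.lowerChar c).toNat : Int) = ((PySem.Chars.lowerChar b).toNat : Int) + 1)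
  else false

-- common normal form: the recursive triple counter
def pvTripCount : List Char → Nat
  | a :: b :: c :: t => (if pvTrip a b c then 1 else 0) + pvTripCount (b :: c :: t)
  | _ => 0

theorem pv_digit_not_alpha (c : Char) (h : PySem.Chars.isdigit c = true) :
    PySem.Chars.isalpha c = false := by
  simp only [PySem.Chars.isdigit, PySem.Chars.isalpha, PySem.Chars.isupper, PySem.Chars.islower,
    Char.le_def, UInt32.le_iff_toNat_le, Bool.and_eq_true, decide_eq_true_eq,
    Bool.or_eq_false_iff, Bool.and_eq_false_iff, decide_eq_false_iff_not, not_le] at *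
  have hlit : ('0'.val.toNat = 48 ∧ '9'.val.toNat = 57 ∧ 'A'.val.toNat = 65 ∧ 'Z'.val.toNat = 90 ∧
      'a'.val.toNat = 97 ∧ 'z'.val.toNat = 122) := by decide
  omega

theorem pv_trip_eq_pairs (a b c : Char) :
    pvTrip a b c = (pvPairSeq a b && pvPairSeq b c) := by
  have h1 := pv_digit_not_alpha a
  have h2 := pv_digit_not_alpha b
  have h3 := pv_digit_not_alpha c
  unfold pvTrip pvPairSeq
  cases hda : PySem.Chars.isdigit a <;> cases hdb : PySem.Chars.isdigit b <;>
    cases hdc : PySem.Chars.isdigit c <;> cases haa : PySem.Chars.isalpha a <;>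
    cases hab : PySem.Chars.isalpha b <;> cases hac : PySem.Chars.isalpha c <;>
    simp_all [Bool.decide_and]

theorem pv_A_countP (cs : List Char) :
    ((List.range ((cs.length : Int) - 2).toNat).countP
        (fun k => pvTrip (cs.getD k ' ') (cs.getD (k + 1) ' ') (cs.getD (k + 2) ' ')) : Nat)
      = pvTripCount cs := by
  match cs with
  | [] => rfl
  | [a] => rfl
  | [a, b] => rfl
  | a :: b :: c :: t =>
    have hlen : ((((a :: b :: c :: t).length : Int)) - 2).toNat = t.length + 1 := by
      simp [List.length_cons]; omega
    have hlen' : ((((b :: c :: t).length : Int)) - 2).toNat = t.length := by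
      simp [List.length_cons]; omega
    rw [hlen, List.range_succ_eq_map, List.countP_cons, List.countP_map]
    have ih := pv_A_countP (b :: c :: t)
    rw [hlen'] at ih
    have hcomp :
        ((fun k => pvTrip ((a :: b :: c :: t).getD k ' ') ((a :: b :: c :: t).getD (k + 1) ' ')
            ((a :: b :: c :: t).getD (k + 2) ' ')) ∘ Nat.succ)
          = fun k => pvTrip ((b :: c :: t).getD k ' ') ((b :: c :: t).getD (k + 1) ' ')
            ((b :: c :: t).getD (k + 2) ' ') := by
      funext k
      simp [Nat.succ_eq_add_one]
    rw [hcomp, ih]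
    simp [pvTripCount, List.getD]
    omega

theorem pv_A_norm (password : String) :
    count_sequential_chars_py password = (pvTripCount password.toList : Int) := by
  unfold count_sequential_chars_py
  have hbody :
      (fun (count : Int) (i : Int) =>
        if PySem.Chars.isdigit (PySem.List.pyGetD password.toList i ' ') &&
           PySem.Chars.isdigit (PySem.List.pyGetD password.toList (i + 1) ' ') &&
           PySem.Chars.isdigit (PySem.List.pyGetD password.toList (i + 2) ' ') then
          if ((PySem.List.pyGetD password.toList (i + 1) ' ').toNat : Int) = ((PySem.List.pyGetD password.toList i ' ').toNat : Int) + 1 ∧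
             ((PySem.List.pyGetD password.toList (i + 2) ' ').toNat : Int) = ((PySem.List.pyGetD password.toList (i + 1) ' ').toNat : Int) + 1 then
            count + 1
          else count
        else if PySem.Chars.isalpha (PySem.List.pyGetD password.toList i ' ') &&
                PySem.Chars.isalpha (PySem.List.pyGetD password.toList (i + 1) ' ') &&
                PySem.Chars.isalpha (PySem.List.pyGetD password.toList (i + 2) ' ') then
          if ((PySem.Chars.lowerChar (PySem.List.pyGetD password.toList (i + 1) ' ')).toNat : Int) = ((PySem.Chars.lowerChar (PySem.List.pyGetD password.toList i ' ')).toNat : Int) + 1 ∧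
             ((PySem.Chars.lowerChar (PySem.List.pyGetD password.toList (i + 2) ' ')).toNat : Int) = ((PySem.Chars.lowerChar (PySem.List.pyGetD password.toList (i + 1) ' ')).toNat : Int) + 1 then
            count + 1
          else count
        else count)
      = fun (count : Int) (i : Int) =>
          if pvTrip (PySem.List.pyGetD password.toList i ' ') (PySem.List.pyGetD password.toList (i + 1) ' ')
              (PySem.List.pyGetD password.toList (i + 2) ' ') then count + 1 else count := by
    funext count i
    simp only [pvTrip]
    split_ifs <;> simp_all
  rw [hbody, PySem.List.pyRange_one]
  rw [List.foldl_map]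
  have hsteps :
      (fun (count : Int) (k : Nat) =>
        if pvTrip (PySem.List.pyGetD password.toList (0 + (k : Int)) ' ') (PySem.List.pyGetD password.toList (0 + (k : Int) + 1) ' ')
            (PySem.List.pyGetD password.toList (0 + (k : Int) + 2) ' ') then count + 1 else count)
      = fun (count : Int) (k : Nat) =>
        if pvTrip (password.toList.getD k ' ') (password.toList.getD (k + 1) ' ') (password.toList.getD (k + 2) ' ') then count + 1
        else count := by
    funext count k
    simp only [zero_add]
    rw [show ((k : Int) + 1) = (((k + 1 : Nat)) : Int) by push_cast; ring,
        show ((k : Int) + 2) = (((k + 2 : Nat)) : Int) by push_cast; ring,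
        PySem.List.pyGetD_natCast, PySem.List.pyGetD_natCast, PySem.List.pyGetD_natCast]
  rw [hsteps, PySem.List.foldl_count_if]
  simp only [sub_zero, zero_add]
  exact congrArg Nat.cast (pv_A_countP password.toList)

theorem pv_B_norm (cs : List Char) :
    (((pvSeq cs).zip (pvSeq cs).tail).countP (fun p => p.1 && p.2) : Nat) = pvTripCount cs := by
  match cs with
  | [] => rfl
  | [a] => rfl
  | [a, b] => rfl
  | a :: b :: c :: t =>
    have ih := pv_B_norm (b :: c :: t)
    have hseq : pvSeq (a :: b :: c :: t) = pvPairSeq a b :: pvSeq (b :: c :: t) := by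
      simp [pvSeq]
    have hseq2 : pvSeq (b :: c :: t) = pvPairSeq b c :: pvSeq (c :: t) := by
      simp [pvSeq]
    rw [hseq, List.tail_cons]
    rw [hseq2] at ih ⊢
    simp only [List.tail_cons] at ih
    rw [List.zip_cons_cons, List.countP_cons, ih]
    simp [pvTripCount, pv_trip_eq_pairs]
    omega

-- ===== VERDICT (by name: the statement is the Claim_ definition above) =====
theorem count_sequential_chars_py_spec : Claim_equal_count_sequential_chars_py := by
  intro password _
  unfold Spec_count_sequential_chars_py count_sequential_chars_py_alt
  rw [pv_A_norm]
  exact congrArg Nat.cast (pv_B_norm password.toList).symm
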